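-- pv_equiv track=rewrite | github.com/yandun72/2022_CCF_BDCI_Relation_Extraction_Rank2 | code/GP_code/dataloader.py | search
-- ===== SOURCE A (Python) =====
-- def search(pattern, sequence, pos):
--     """从sequence中寻找子串pattern
--     如果找到，返回第一个下标；否则返回-1。
--     """
--     h_pos = pos[0]
--     n = len(pattern)
--     c = [-1]
--     for i in range(len(sequence)):
--         if sequence[i:i + n] == pattern and i <= h_pos + 1:
--             c.append(i)
--     return c[-1]
-- ===== SOURCE B (Python) =====
-- def search(pattern, sequence, pos):
--     """Scan backwards from the position bound and return the first match (= A's last qualifying index)."""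
--     n = len(pattern)
--     i = min(len(sequence) - 1, pos[0] + 1)
--     while i >= 0:
--         if sequence[i:i + n] == pattern:
--             return i
--         i -= 1
--     return -1
-- ===== Notes on version B (the rewrite author's own statement) =====
-- stated objective: simpler
-- what changed: Instead of scanning the whole sequence forward and collecting every qualifying start index in a list to take its last element, B scans backwards from the bound min(len(sequence)-1, pos[0]+1) and returns the first match it finds (early exit, no accumulator, O(1) extra space).
import Mathlib
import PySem

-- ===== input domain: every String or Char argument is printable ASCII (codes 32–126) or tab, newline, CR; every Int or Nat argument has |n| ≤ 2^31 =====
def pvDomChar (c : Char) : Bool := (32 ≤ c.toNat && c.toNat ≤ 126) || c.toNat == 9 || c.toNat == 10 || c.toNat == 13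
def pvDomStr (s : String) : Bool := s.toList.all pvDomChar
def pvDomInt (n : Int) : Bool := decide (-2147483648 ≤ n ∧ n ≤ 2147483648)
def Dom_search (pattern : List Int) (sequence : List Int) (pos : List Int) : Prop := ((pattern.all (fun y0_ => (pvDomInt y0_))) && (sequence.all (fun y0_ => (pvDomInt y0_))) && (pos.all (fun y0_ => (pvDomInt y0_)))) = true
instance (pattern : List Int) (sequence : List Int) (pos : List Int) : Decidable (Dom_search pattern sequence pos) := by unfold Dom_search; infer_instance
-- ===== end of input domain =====

-- B replaces A's forward scan that appends every qualifying index to a list (returning its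
-- last element) by a backward scan from the bound that returns the first match it finds.

-- ===== PORT A =====
def search (pattern : List Int) (sequence : List Int) (pos : List Int) : Int :=
  let h_pos := PySem.List.pyGetD pos 0 0
  let n : Int := pattern.length
  let c := (PySem.List.pyRange 0 (sequence.length : Int) 1).foldl
    (fun c i =>
      if PySem.List.slice sequence (some i) (some (i + n)) = pattern ∧ i ≤ h_pos + 1
      then c ++ [i] else c)
    [-1]
  PySem.List.pyGetD c (-1) 0

-- ===== PORT B =====
def searchAltLoop (pattern : List Int) (sequence : List Int) (i : Int) : Int :=
  if 0 ≤ i then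
    if PySem.List.slice sequence (some i) (some (i + (pattern.length : Int))) = pattern then i
    else searchAltLoop pattern sequence (i - 1)
  else -1
termination_by (i + 1).toNat
decreasing_by omega

def search_alt (pattern : List Int) (sequence : List Int) (pos : List Int) : Int :=
  let h_pos := PySem.List.pyGetD pos 0 0
  searchAltLoop pattern sequence (min ((sequence.length : Int) - 1) (h_pos + 1))

-- ===== PRECONDITION & SPEC =====
-- Pre_ excludes only pos = [], where Python A raises IndexError on pos[0] (B raises too).
def Pre_search (pattern : List Int) (sequence : List Int) (pos : List Int) : Prop := pos ≠ []
instance (pattern : List Int) (sequence : List Int) (pos : List Int) : Decidable (Pre_search pattern sequence pos) := by unfold Pre_search; infer_instance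
def pvWitness_search : List Int × List Int × List Int := ([1, 2], [0, 1, 2, 1, 2], [5])

def Spec_search (pattern : List Int) (sequence : List Int) (pos : List Int) (out : Int) : Prop := out = search_alt pattern sequence pos
instance (pattern : List Int) (sequence : List Int) (pos : List Int) (out : Int) : Decidable (Spec_search pattern sequence pos out) := by unfold Spec_search; infer_instance

-- ===== CLAIM (what is proved, stated in full; the proofs are below) =====
def Claim_equal_search : Prop := ∀ (pattern : List Int) (sequence : List Int) (pos : List Int), Dom_search pattern sequence pos → Pre_search pattern sequence pos → Spec_search pattern sequence pos (search pattern sequence pos)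

-- ===== LEMMAS AND PROOFS =====

-- B's loop returns the last index in [0, i] where the slice matches, or -1.
theorem searchAltLoop_char (pattern sequence : List Int) (i : Int) :
    searchAltLoop pattern sequence i =
      (((PySem.List.pyRange 0 (i + 1) 1).filter
          (fun j => decide (PySem.List.slice sequence (some j) (some (j + (pattern.length : Int))) = pattern))).getLast?).getD (-1) := by
  fun_induction searchAltLoop with
  | case1 i h hm =>
    rw [PySem.List.pyRange_one_succ_right h, List.filter_append]
    simp [hm]
  | case2 i h hm ih =>
    rw [PySem.List.pyRange_one_succ_right h, List.filter_append]
    simp only [List.filter_cons, List.filter_nil]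
    rw [if_neg (by simpa using hm)]
    simpa using ih
  | case3 i h =>
    rw [PySem.List.pyRange_one_eq_nil (by omega)]
    simp

theorem lastCons (F : List Int) (h : ((-1 : Int) :: F) ≠ []) :
    ((-1 : Int) :: F).getLast h = F.getLast?.getD (-1) := by
  cases F with
  | nil => simp
  | cons a t => rw [List.getLast_cons (by simp)]; simp [List.getLast?_eq_some_getLast]

-- A's filtered index list (both conjuncts, full range) is B's (slice test only, bounded range).
theorem filter_eq (pattern sequence : List Int) (h : Int) :
    (PySem.List.pyRange 0 (sequence.length : Int) 1).filter
        (fun i => decide (PySem.List.slice sequence (some i) (some (i + (pattern.length : Int))) = pattern ∧ i ≤ h + 1))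
      = (PySem.List.pyRange 0 (min ((sequence.length : Int) - 1) (h + 1) + 1) 1).filter
        (fun j => decide (PySem.List.slice sequence (some j) (some (j + (pattern.length : Int))) = pattern)) := by
  set m : Int := (sequence.length : Int) with hm
  have hm0 : 0 ≤ m := Int.natCast_nonneg _
  set u : Int := min (m - 1) (h + 1) with hu
  by_cases hc : u + 1 ≤ 0
  · rw [PySem.List.pyRange_one_eq_nil hc, List.filter_nil]
    rw [List.filter_eq_nil_iff]
    intro j hj
    rw [PySem.List.mem_pyRange_one] at hj
    simp only [decide_eq_true_eq, not_and]
    intro _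
    omega
  · have h1 : (0:Int) ≤ u + 1 := by omega
    have h2 : u + 1 ≤ m := by omega
    rw [PySem.List.pyRange_one_append 0 (u+1) m h1 h2, List.filter_append]
    have hnil : (PySem.List.pyRange (u+1) m 1).filter
        (fun i => decide (PySem.List.slice sequence (some i) (some (i + (pattern.length : Int))) = pattern ∧ i ≤ h + 1)) = [] := by
      rw [List.filter_eq_nil_iff]
      intro j hj
      rw [PySem.List.mem_pyRange_one] at hj
      simp only [decide_eq_true_eq, not_and]
      intro _
      omega
    rw [hnil, List.append_nil]
    apply List.filter_congr
    intro j hj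
    rw [PySem.List.mem_pyRange_one] at hj
    rw [decide_eq_decide]
    constructor
    · rintro ⟨h1', _⟩; exact h1'
    · intro h1'; exact ⟨h1', by omega⟩

theorem search_spec_aux (pattern sequence pos : List Int) (hp : pos ≠ []) :
    search pattern sequence pos = search_alt pattern sequence pos := by
  show PySem.List.pyGetD _ (-1) 0 = searchAltLoop _ _ _
  rw [PySem.List.foldl_append_ite_eq_filter]
  rw [searchAltLoop_char]
  rw [show ([(-1 : Int)] ++ _) = ((-1 : Int) :: ((PySem.List.pyRange 0 (sequence.length : Int) 1).filter
      (fun i => decide (PySem.List.slice sequence (some i) (some (i + (pattern.length : Int))) = pattern ∧ i ≤ PySem.List.pyGetD pos 0 0 + 1)))) from rfl]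
  rw [PySem.List.pyGetD_neg_one _ _ (List.cons_ne_nil _ _)]
  rw [lastCons]
  rw [filter_eq]

-- ===== VERDICT (by name: the statement is the Claim_ definition above) =====
theorem search_spec : Claim_equal_search := by
  intro pattern sequence pos _ hpre
  exact search_spec_aux pattern sequence pos hpre
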